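-- pv_equiv track=rewrite | github.com/S0NGMinHyuk/programmers-file | 위클리챌린지_4주차.py | solution
-- ===== SOURCE A (Python) =====
-- def solution(table, languages, preference):
--     result = '' ; point = 0
--     # result = 정답용 문자열, point = 점수 확인용 리스트
--
--     for job in table:
--         job = list(job.split()) ; total = 0
--         # 문자열인 job 변수를 리스트로 변환
--         # total = 해당 직업군의 언어 총합 점수
--
--         for i in range(len(languages)):
--             try:
--                 total += (6 -job.index(languages[i])) *preference[i]
--                 # languages[i]가 job 리스트에 있다면 total 점수에 추가
--             except:
--                 None
--                 # 없다면 0점이므로 None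
--
--         if total > point:
--             point = total ; result = job[0]
--             # total 이 point 보다 크다면 result 에 직업의 이름을 넣고
--             # point 값을 total 값으로 교환
--
--         elif total == point:
--             if job[0] < result:
--                 result = job[0]
--             # total 값이 point 값과 같다면 직업의 이름이 사전 순에서
--             # 더 먼저 오는 값으로 교환, point 값은 건드릴 필요 없다.
--
--     return result
-- ===== SOURCE B (Python) =====
-- def solution(table, languages, preference):
--     # Invert the scan: sum preferences per language once into a dict, then
--     # walk each job's word list a single time, crediting first occurrences.
--     pref = {}
--     for lang, p in zip(languages, preference):
--         pref[lang] = pref.get(lang, 0) + p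
--
--     pairs = []
--     for job in table:
--         words = job.split()
--         total = 0
--         seen = set()
--         for i, w in enumerate(words):
--             if w not in seen:
--                 seen.add(w)
--                 total += (6 - i) * pref.get(w, 0)
--         pairs.append((words[0], total))
--
--     best = max((s for _, s in pairs), default=0)
--     if best <= 0:
--         return ''
--     return min(n for n, s in pairs if s == best)
-- ===== Notes on version B (the rewrite author's own statement) =====
-- stated objective: faster
-- what changed: A scans each job's word list once per language with job.index inside try/except and keeps a running (result, point) best; B inverts the traversal: it aggregates preferences per language into one dict, walks each job's words a single time crediting first occurrences via the dict (the inner index scan disappears), then selects in two staged passes (max score, then lexicographic min among the jobs attaining it), returning '' when the best score is not positive.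
-- outside the precondition, e.g. on solution(['python 1', ' '], ['python'], [1]): A returns 'python', B raises IndexError
import Mathlib
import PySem

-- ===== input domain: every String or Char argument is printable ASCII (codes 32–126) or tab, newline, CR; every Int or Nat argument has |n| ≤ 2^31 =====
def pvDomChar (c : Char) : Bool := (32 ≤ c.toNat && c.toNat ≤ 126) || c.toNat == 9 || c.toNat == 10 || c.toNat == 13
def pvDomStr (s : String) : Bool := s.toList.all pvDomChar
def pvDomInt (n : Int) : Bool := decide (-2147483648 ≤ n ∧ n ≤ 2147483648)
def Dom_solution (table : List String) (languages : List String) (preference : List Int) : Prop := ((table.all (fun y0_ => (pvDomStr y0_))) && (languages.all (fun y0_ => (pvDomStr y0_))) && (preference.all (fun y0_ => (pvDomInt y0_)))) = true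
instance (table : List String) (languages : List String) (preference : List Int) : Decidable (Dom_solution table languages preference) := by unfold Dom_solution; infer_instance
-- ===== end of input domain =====

-- ===== PORT A =====
-- B inverts A's traversal (a preference dict per language, one pass over each job's words,
-- then staged max/min selection) — objective: faster (the per-language inner index scan disappears).
-- inner loop of A: for i in range(len(languages)): try: total += (6 - job.index(languages[i])) * preference[i] except: pass
def scoreA (job : List String) (languages : List String) (preference : List Int) : Int :=
  (PySem.List.pyRange 0 (PySem.List.len languages) 1).foldl
    (fun total i =>
      match PySem.List.pyGet? languages i with
      | none => total
      | some l =>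
        match PySem.List.index? job l with
        | none => total
        | some idx =>
          match PySem.List.pyGet? preference i with
          | none => total
          | some p => total + (6 - (idx : Int)) * p)
    0

def solution (table : List String) (languages : List String) (preference : List Int) : String :=
  (table.foldl
    (fun (st : String × Int) jobStr =>
      let job := PySem.Str.split₀ jobStr
      let total := scoreA job languages preference
      if total > st.2 then (PySem.List.pyGetD job 0 "", total)
      else if total = st.2 then
        (if PySem.List.pyGetD job 0 "" < st.1 then (PySem.List.pyGetD job 0 "", st.2) else st)
      else st)
    ("", 0)).1

-- ===== PORT B =====
-- Source B: pref[lang] = pref.get(lang, 0) + p over zip(languages, preference)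
def prefMapB (languages : List String) (preference : List Int) : PySem.Dict String Int :=
  (languages.zip preference).foldl
    (fun d lp => d.insert lp.1 (d.getD lp.1 0 + lp.2)) PySem.Dict.empty

-- Source B's inner loop: for i, w in enumerate(words): if w not in seen: seen.add(w); total += (6 - i) * pref.get(w, 0)
def scoreBGo (pref : PySem.Dict String Int) : List String → Int → Int → PySem.Set String → Int
  | [], total, _, _ => total
  | w :: ws, total, i, seen =>
    if PySem.Set.contains seen w then scoreBGo pref ws total (i + 1) seen
    else scoreBGo pref ws (total + (6 - i) * pref.getD w 0) (i + 1) (PySem.Set.add seen w)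

-- one job's (name, total) pair
def entryB (pref : PySem.Dict String Int) (job : String) : String × Int :=
  let words := PySem.Str.split₀ job
  (PySem.List.pyGetD words 0 "", scoreBGo pref words 0 0 PySem.Set.empty)

-- max(gen, default=0) of the scores
def bestB (scores : List Int) : Int :=
  match PySem.List.max? scores (fun s : Int => s) with
  | none => 0
  | some b => b

-- min(...) of the names attaining the best score ("" unreachable: best is attained)
def minNameB (names : List String) : String :=
  match PySem.List.min? names (fun n : String => n) with
  | none => ""
  | some n => n

def solution_alt (table : List String) (languages : List String) (preference : List Int) : String :=
  let pref := prefMapB languages preference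
  let pairs := table.map (entryB pref)
  let best := bestB (pairs.map (fun c => c.2))
  if best ≤ 0 then ""
  else minNameB ((pairs.filter (fun c => c.2 == best)).map (fun c => c.1))

-- ===== PRECONDITION & SPEC =====
-- Pre_ excludes tables containing a whitespace-only/empty entry: there A's job[0] raises IndexError
-- whenever the loop reaches it with total ≥ point (and B's words[0] raises on every such entry).
def Pre_solution (table : List String) (languages : List String) (preference : List Int) : Prop :=
  ∀ s ∈ table, PySem.Str.split₀ s ≠ []
instance (table : List String) (languages : List String) (preference : List Int) : Decidable (Pre_solution table languages preference) := by unfold Pre_solution; infer_instance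

def pvWitness_solution : List String × List String × List Int :=
  (["python 3 java", "java 2 sql"], ["python", "java"], [5, 2])

def Spec_solution (table : List String) (languages : List String) (preference : List Int) (out : String) : Prop := out = solution_alt table languages preference
instance (table : List String) (languages : List String) (preference : List Int) (out : String) : Decidable (Spec_solution table languages preference out) := by unfold Spec_solution; infer_instance

-- ===== CLAIM (what is proved, stated in full; the proofs are below) =====
def Claim_equal_solution : Prop := ∀ (table : List String) (languages : List String) (preference : List Int), Dom_solution table languages preference → Pre_solution table languages preference → Spec_solution table languages preference (solution table languages preference)

-- ===== LEMMAS AND PROOFS =====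

-- A's running (result, point) update, as a two-argument merge
def mergeA (st c : String × Int) : String × Int :=
  if c.2 > st.2 then c
  else if c.2 = st.2 then (if c.1 < st.1 then (c.1, st.2) else st)
  else st

theorem foldl_const_int {α : Type} (f : Int → α → Int) (hf : ∀ t a, f t a = t) :
    ∀ (l : List α) (acc : Int), l.foldl f acc = acc := by
  intro l
  induction l with
  | nil => intro acc; rfl
  | cons a l ih => intro acc; rw [List.foldl_cons, hf]; exact ih acc

theorem score_aux (job : List String) :
    ∀ (ls : List String) (ps : List Int) (acc : Int),
    (List.range ls.length).foldl
      (fun total k =>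
        match ls[k]? with
        | none => total
        | some l =>
          match PySem.List.index? job l with
          | none => total
          | some idx =>
            match ps[k]? with
            | none => total
            | some p => total + (6 - (idx : Int)) * p) acc
    = (ls.zip ps).foldl
        (fun total lp =>
          if lp.1 ∈ job then total + (6 - ((PySem.List.index? job lp.1).getD 0 : Int)) * lp.2
          else total) acc := by
  intro ls
  induction ls with
  | nil => intro ps acc; simp
  | cons l ls ih =>
    intro ps acc
    rw [List.length_cons, List.range_succ_eq_map, List.foldl_cons, List.foldl_map]
    cases ps with
    | nil =>
      simp only [List.zip_nil_right, List.foldl_nil]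
      refine (foldl_const_int _ ?_ _ _).trans ?_
      · intro t k
        simp only [List.getElem?_cons_succ]
        cases h : ls[k]? with
        | none => simp only [h]
        | some l' =>
          simp only [h]
          cases hi : PySem.List.index? job l' with
          | none => simp only [hi]
          | some idx => simp only [hi, List.getElem?_nil]
      · cases hi : PySem.List.index? job l with
        | none => simp only [List.getElem?_cons_zero, hi]
        | some idx => simp only [List.getElem?_cons_zero, hi, List.getElem?_nil]
    | cons p ps =>
      simp only [List.getElem?_cons_succ, List.getElem?_cons_zero, List.zip_cons_cons,
        List.foldl_cons]
      rw [ih]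
      congr 1
      cases hi : PySem.List.index? job l with
      | none =>
        have hmem : l ∉ job := (PySem.List.index?_eq_none_iff job l).mp hi
        simp [hmem]
      | some idx =>
        have hmem : l ∈ job := by
          have := (PySem.List.index?_isSome_iff job l).mp (by rw [hi]; rfl)
          exact this
        simp [hmem, hi]

theorem score_eq (job : List String) (languages : List String) (preference : List Int) :
    scoreA job languages preference =
      (languages.zip preference).foldl
        (fun total lp =>
          if lp.1 ∈ job then total + (6 - ((PySem.List.index? job lp.1).getD 0 : Int)) * lp.2
          else total) 0 := by
  unfold scoreA
  rw [PySem.List.len_eq, PySem.List.pyRange_zero_natCast, List.foldl_map]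
  simp only [PySem.List.pyGet?_natCast]
  exact score_aux job languages preference 0

-- total-additivity of the word loop
theorem scoreBGo_add (d : PySem.Dict String Int) :
    ∀ (ws : List String) (total c i : Int) (seen : PySem.Set String),
    scoreBGo d ws (total + c) i seen = scoreBGo d ws total i seen + c := by
  intro ws
  induction ws with
  | nil => intro total c i seen; rfl
  | cons w ws ih =>
    intro total c i seen
    simp only [scoreBGo]
    split
    · exact ih total c (i + 1) seen
    · rw [add_right_comm]
      exact ih (total + (6 - i) * d.getD w 0) c (i + 1) (PySem.Set.add seen w)

theorem scoreBGo_empty :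
    ∀ (ws : List String) (total i : Int) (seen : PySem.Set String),
    scoreBGo PySem.Dict.empty ws total i seen = total := by
  intro ws
  induction ws with
  | nil => intro total i seen; rfl
  | cons w ws ih =>
    intro total i seen
    simp only [scoreBGo, PySem.Dict.getD_empty, mul_zero, add_zero]
    split <;> exact ih _ _ _

-- adding p at key l raises the job's total by (6 - first index of l) * p, once
theorem scoreBGo_insert (d : PySem.Dict String Int) (l : String) (p : Int) :
    ∀ (ws : List String) (total i : Int) (seen : PySem.Set String),
    scoreBGo (d.insert l (d.getD l 0 + p)) ws total i seen
      = scoreBGo d ws total i seen +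
        (if l ∈ seen then 0
         else match PySem.List.index? ws l with
              | none => 0
              | some j => (6 - (i + (j : Int))) * p) := by
  intro ws
  induction ws with
  | nil =>
    intro total i seen
    simp only [scoreBGo, PySem.List.index?_eq_idxOf?, List.idxOf?_nil]
    split <;> simp
  | cons w ws ih =>
    intro total i seen
    by_cases hw : w ∈ seen
    · have hc : PySem.Set.contains seen w = true := (PySem.Set.contains_iff _ _).mpr hw
      simp only [scoreBGo, hc, if_true]
      rw [ih]
      congr 1
      by_cases hl : l ∈ seen
      · simp [hl]
      · have hwl : w ≠ l := fun h => hl (h ▸ hw)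
        rw [if_neg hl, if_neg hl, PySem.List.index?_cons_of_ne _ hwl]
        cases hj : PySem.List.index? ws l with
        | none => simp
        | some j =>
          simp only [Option.map_some]
          congr 1
          push_cast
          ring
    · have hc : ¬ PySem.Set.contains seen w = true := fun h => hw ((PySem.Set.contains_iff _ _).mp h)
      simp only [scoreBGo, hc, if_false, Bool.not_eq_true] at *
      rw [if_neg (by simpa using hc), if_neg (by simpa using hc)]
      by_cases hwl : w = l
      · subst hwl
        have hlin : w ∈ PySem.Set.add seen w := by
          rw [PySem.Set.mem_add]; exact Or.inr rfl
        rw [PySem.Dict.getD_insert_self, ih, if_pos hlin, add_zero, if_neg hw,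
          PySem.List.index?_cons_self]
        have hacc : total + (6 - i) * (d.getD w 0 + p)
            = (total + (6 - i) * d.getD w 0) + (6 - i) * p := by ring
        rw [hacc, scoreBGo_add]
        simp
      · rw [PySem.Dict.getD_insert_of_ne _ _ _ hwl, ih]
        congr 1
        by_cases hl : l ∈ seen
        · have : l ∈ PySem.Set.add seen w := by rw [PySem.Set.mem_add]; exact Or.inl hl
          simp [hl, this]
        · have : l ∉ PySem.Set.add seen w := by
            rw [PySem.Set.mem_add]
            rintro (h | h)
            · exact hl h
            · exact hwl h.symm
          rw [if_neg hl, if_neg this, PySem.List.index?_cons_of_ne _ hwl]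
          cases hj : PySem.List.index? ws l with
          | none => simp
          | some j =>
            simp only [Option.map_some]
            congr 1
            push_cast
            ring

-- B's dict-driven word walk computes A's language-indexed sum
theorem scoreB_eq_zip (words : List String) :
    ∀ (zps : List (String × Int)),
    scoreBGo (zps.foldl (fun d lp => d.insert lp.1 (d.getD lp.1 0 + lp.2)) PySem.Dict.empty)
      words 0 0 PySem.Set.empty
      = zps.foldl
          (fun total lp =>
            if lp.1 ∈ words then total + (6 - ((PySem.List.index? words lp.1).getD 0 : Int)) * lp.2
            else total) 0 := by
  intro zps
  induction zps using List.reverseRecOn with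
  | nil => exact scoreBGo_empty words 0 0 PySem.Set.empty
  | append_singleton zs lp ih =>
    have hnm : lp.1 ∉ (PySem.Set.empty : PySem.Set String) := by
      simp [PySem.Set.empty]
    rw [List.foldl_append, List.foldl_append, List.foldl_cons, List.foldl_nil,
      List.foldl_cons, List.foldl_nil, scoreBGo_insert, ih, if_neg hnm]
    cases hj : PySem.List.index? words lp.1 with
    | none =>
      have : lp.1 ∉ words := (PySem.List.index?_eq_none_iff words lp.1).mp hj
      simp [this]
    | some j =>
      have : lp.1 ∈ words := (PySem.List.index?_isSome_iff words lp.1).mp (by rw [hj]; rfl)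
      simp [this, hj]

-- running max with a lowered start
theorem foldl_max2_init :
    ∀ (l : List (String × Int)) (a b : Int),
    l.foldl (fun acc c => max acc c.2) (max a b) = max a (l.foldl (fun acc c => max acc c.2) b) := by
  intro l
  induction l with
  | nil => intro a b; rfl
  | cons c l ih =>
    intro a b
    simp only [List.foldl_cons, max_assoc]
    exact ih a (max b c.2)

theorem not_lt_empty (s : String) : ¬ s < "" := by
  simp [String.lt_iff_toList_lt]

-- invariant of A's selection fold, against B's staged max/min selection
theorem sel_inv :
    ∀ (cs : List (String × Int)),
    (cs.foldl mergeA ("", 0)).2 = cs.foldl (fun acc c => max acc c.2) 0 ∧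
    (0 < cs.foldl (fun acc c => max acc c.2) 0 →
      ∃ n ns,
        (cs.filter (fun c => c.2 == cs.foldl (fun acc c => max acc c.2) 0)).map (fun c => c.1)
          = n :: ns ∧
        (cs.foldl mergeA ("", 0)).1 = ns.foldl min n) ∧
    (cs.foldl (fun acc c => max acc c.2) 0 = 0 → (cs.foldl mergeA ("", 0)).1 = "") := by
  intro cs
  induction cs using List.reverseRecOn with
  | nil => exact ⟨rfl, fun h => absurd h (by simp), fun _ => rfl⟩
  | append_singleton cs c ih =>
    obtain ⟨h2, hpos, hzero⟩ := ih
    have hbounds := PySem.List.le_foldl_max_int cs (fun c => c.2) 0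
    rw [List.foldl_append, List.foldl_append, List.foldl_cons, List.foldl_nil,
      List.foldl_cons, List.foldl_nil, List.filter_append, List.map_append,
      List.filter_singleton]
    set M := cs.foldl (fun acc c => max acc c.2) 0 with hM
    have hM0 : 0 ≤ M := hbounds.1
    have hle : ∀ x ∈ cs, x.2 ≤ M := hbounds.2
    rcases lt_trichotomy M c.2 with hlt | heq | hgt
    · -- c strictly improves: new state is c, new max is c.2
      have hmerge : mergeA (cs.foldl mergeA ("", 0)) c = c := by
        simp [mergeA, h2, hlt]
      have hmax : max M c.2 = c.2 := max_eq_right (le_of_lt hlt)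
      rw [hmax, hmerge]
      have hfilt : cs.filter (fun x => x.2 == c.2) = [] := by
        rw [List.filter_eq_nil_iff]
        intro x hx
        have := hle x hx
        simp only [beq_iff_eq]
        omega
      refine ⟨rfl, fun _ => ⟨c.1, [], ?_, rfl⟩, fun h0 => absurd h0 (by omega)⟩
      rw [hfilt]
      simp
    · -- tie: lexicographic min of names at score M
      have hmax : max M c.2 = M := max_eq_left (le_of_eq heq.symm)
      have hc2 : c.2 = M := heq.symm
      rw [hmax]
      by_cases hMpos : 0 < M
      · obtain ⟨n, ns, hmap, hfold⟩ := hpos hMpos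
        have hmerge : mergeA (cs.foldl mergeA ("", 0)) c
            = (min (cs.foldl mergeA ("", 0)).1 c.1, M) := by
          simp only [mergeA]
          rw [h2, hc2, if_neg (lt_irrefl M), if_pos rfl]
          rcases lt_or_ge c.1 ((cs.foldl mergeA ("", 0)).1) with hlt1 | hge1
          · rw [if_pos hlt1, min_eq_right (le_of_lt hlt1)]
          · rw [if_neg (not_lt_of_ge hge1), min_eq_left hge1, ← h2]
        rw [hmerge]
        refine ⟨rfl, fun _ => ⟨n, ns ++ [c.1], ?_, ?_⟩, fun h0 => absurd h0 (by omega)⟩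
        · simp only [hc2, beq_self_eq_true, cond_true, hmap]
          simp
        · rw [List.foldl_append, List.foldl_cons, List.foldl_nil, ← hfold]
      · have hMeq : M = 0 := by omega
        have hr : (cs.foldl mergeA ("", 0)).1 = "" := hzero hMeq
        have hmerge : mergeA (cs.foldl mergeA ("", 0)) c = cs.foldl mergeA ("", 0) := by
          simp only [mergeA]
          rw [h2, hc2, if_neg (lt_irrefl M), if_pos rfl, hr, if_neg (not_lt_empty c.1)]
        rw [hmerge]
        exact ⟨h2, fun h0 => absurd h0 (by omega), fun _ => hr⟩
    · -- c is worse: nothing changes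
      have hmax : max M c.2 = M := max_eq_left (le_of_lt hgt)
      have hmerge : mergeA (cs.foldl mergeA ("", 0)) c = cs.foldl mergeA ("", 0) := by
        simp only [mergeA]
        rw [h2]
        rw [if_neg (by omega), if_neg (by omega)]
      have hne : (c.2 == M) = false := by
        simp only [beq_eq_false_iff_ne, ne_eq]
        omega
      rw [hmax, hmerge]
      simp only [hne, cond_false, List.map_nil, List.append_nil]
      exact ⟨h2, hpos, hzero⟩

-- A's one-pass selection equals B's staged max/min selection
theorem sel_eq (cs : List (String × Int)) :
    (cs.foldl mergeA ("", 0)).1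
      = (if bestB (cs.map (fun c => c.2)) ≤ 0 then ""
         else minNameB
           ((cs.filter (fun c => c.2 == bestB (cs.map (fun c => c.2)))).map (fun c => c.1))) := by
  obtain ⟨h2, hpos, hzero⟩ := sel_inv cs
  cases cs with
  | nil => rfl
  | cons c cs' =>
    have hbest : bestB ((c :: cs').map (fun c => c.2))
        = cs'.foldl (fun acc c => max acc c.2) c.2 := by
      simp only [bestB, List.map_cons, PySem.List.max?_id_cons, List.foldl_map]
    have hMrw : (c :: cs').foldl (fun acc c => max acc c.2) 0
        = max 0 (cs'.foldl (fun acc c => max acc c.2) c.2) := by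
      rw [List.foldl_cons]
      exact foldl_max2_init cs' 0 c.2
    set b := cs'.foldl (fun acc c => max acc c.2) c.2 with hb
    by_cases hble : b ≤ 0
    · rw [hbest, if_pos hble]
      apply hzero
      rw [hMrw]
      exact max_eq_left hble
    · have hMb : (c :: cs').foldl (fun acc c => max acc c.2) 0 = b := by
        rw [hMrw]
        exact max_eq_right (by omega)
      rw [hMb] at hpos
      obtain ⟨n, ns, hmap, hfold⟩ := hpos (by omega)
      rw [hbest, if_neg hble, hmap]
      simp only [minNameB, PySem.List.min?_id_cons]
      exact hfold

theorem main_eq (table : List String) (languages : List String) (preference : List Int) :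
    solution table languages preference = solution_alt table languages preference := by
  unfold solution
  simp only [solution_alt]
  have hstepA : (fun (st : String × Int) jobStr =>
      let job := PySem.Str.split₀ jobStr
      let total := scoreA job languages preference
      if total > st.2 then (PySem.List.pyGetD job 0 "", total)
      else if total = st.2 then
        (if PySem.List.pyGetD job 0 "" < st.1 then (PySem.List.pyGetD job 0 "", st.2) else st)
      else st)
      = fun st j => mergeA st (entryB (prefMapB languages preference) j) := by
    funext st j
    simp only [entryB, mergeA, score_eq, prefMapB, scoreB_eq_zip]
  rw [hstepA, ← List.foldl_map (f := entryB (prefMapB languages preference)) (g := mergeA)]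
  exact sel_eq (table.map (entryB (prefMapB languages preference)))

-- ===== VERDICT (by name: the statement is the Claim_ definition above) =====
theorem solution_spec : Claim_equal_solution := by
  intro table languages preference _ _
  unfold Spec_solution
  exact main_eq table languages preference
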